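-- pv_equiv track=rewrite | github.com/lee95292/AlgoGaza | PGMS/DP/cardGame.py | solution
-- ===== SOURCE A (Python) =====
-- def solution(left, right):
--     L = len(left)
--     R = len(right)
--     dp = [[] for x in range(0, len(left))]
--     for i in range(0, len(left)):
--         dp[i].extend([-1 for x in range(0, len(right))])
--
--     def recurs(a, b):
--         if(a == L or b == R):
--             return 0
--
--         if(dp[a][b] != -1):
--             return dp[a][b]
--
--         dp[a][b] = max(recurs(a+1, b), recurs(a+1, b+1))
--
--         if(left[a] > right[b]):
--             dp[a][b] = max(dp[a][b], recurs(a, b+1)+right[b])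
--
--         return dp[a][b]
--
--     return recurs(0, 0)
-- ===== SOURCE B (Python) =====
-- def solution(left, right):
--     R = len(right)
--     row = [0] * (R + 1)
--     for a in range(len(left) - 1, -1, -1):
--         new = [0]
--         for b in range(R - 1, -1, -1):
--             best = max(row[b], row[b + 1])
--             if left[a] > right[b]:
--                 best = max(best, new[0] + right[b])
--             new.insert(0, best)
--         row = new
--     return row[0]
-- ===== Notes on version B (the rewrite author's own statement) =====
-- stated objective: simpler
-- what changed: Replaced the memoized top-down recursion over an L x R table with an iterative bottom-up DP that keeps only one rolling row of size R+1, filling it back-to-front.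
import Mathlib
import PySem

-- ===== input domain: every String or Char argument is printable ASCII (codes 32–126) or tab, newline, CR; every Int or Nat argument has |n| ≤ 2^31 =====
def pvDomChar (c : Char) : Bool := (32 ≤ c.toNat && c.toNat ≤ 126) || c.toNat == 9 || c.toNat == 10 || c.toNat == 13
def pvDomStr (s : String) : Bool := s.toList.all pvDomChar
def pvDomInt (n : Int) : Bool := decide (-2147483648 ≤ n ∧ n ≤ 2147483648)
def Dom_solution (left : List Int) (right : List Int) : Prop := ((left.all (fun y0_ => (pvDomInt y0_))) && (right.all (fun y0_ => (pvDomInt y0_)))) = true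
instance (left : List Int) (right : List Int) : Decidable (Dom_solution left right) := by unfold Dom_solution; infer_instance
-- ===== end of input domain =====

-- B replaces A's memoized top-down recursion (full L×R memo table) with an iterative
-- bottom-up DP keeping a single rolling row of size R+1, built back-to-front (simpler, O(R) space).

-- ===== PORT A =====
-- dp[a][b] read / write helpers (indices are always in range when used: 0 ≤ a < L, 0 ≤ b < R)
def pvGet2 (dp : List (List Int)) (a b : Nat) : Int := (dp.getD a []).getD b (-1)
def pvSet2 (dp : List (List Int)) (a b : Nat) (v : Int) : List (List Int) :=
  dp.set a ((dp.getD a []).set b v)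

-- the inner closure `recurs`, with the mutated memo table `dp` threaded as state.
-- Python tests `a == L or b == R`; a and b never exceed L / R during execution, so the
-- `≤` test below is the same condition (written with ≤ only to make termination evident).
def pvRecursA (left right : List Int) (a b : Nat) (dp : List (List Int)) :
    Int × List (List Int) :=
  if _hLR : left.length ≤ a ∨ right.length ≤ b then (0, dp)
  else
    if pvGet2 dp a b ≠ -1 then (pvGet2 dp a b, dp)
    else
      let r1 := pvRecursA left right (a+1) b dp
      let r2 := pvRecursA left right (a+1) (b+1) r1.2
      let dp3 := pvSet2 r2.2 a b (max r1.1 r2.1)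
      if left.getD a 0 > right.getD b 0 then
        let cur := pvGet2 dp3 a b
        let r3 := pvRecursA left right a (b+1) dp3
        let dp5 := pvSet2 r3.2 a b (max cur (r3.1 + right.getD b 0))
        (pvGet2 dp5 a b, dp5)
      else (pvGet2 dp3 a b, dp3)
termination_by (left.length - a) + (right.length - b)
decreasing_by all_goals omega

def solution (left : List Int) (right : List Int) : Int :=
  -- dp = one row of R copies of -1 per left element, per Python's comprehension + extend
  let dp := (List.range left.length).map (fun _ => (List.range right.length).map (fun _ => (-1 : Int)))
  (pvRecursA left right 0 0 dp).1

-- ===== PORT B =====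
-- inner loop: build the new row back-to-front from the previous row; new[b] is prepended
def pvNewRow (la : Int) : List Int → List Int → List Int
  | [], _ => [0]
  | r :: rs, prev =>
      let rest := pvNewRow la rs prev.tail
      let best := max (prev.headD 0) (prev.tail.headD 0)
      let best := if la > r then max best (rest.headD 0 + r) else best
      best :: rest

def solution_alt (left : List Int) (right : List Int) : Int :=
  -- outer loop over a descending = foldr over left
  (left.foldr (fun la row => pvNewRow la right row)
      (List.replicate (right.length + 1) 0)).headD 0

-- ===== PRECONDITION & SPEC =====
def Spec_solution (left : List Int) (right : List Int) (out : Int) : Prop := out = solution_alt left right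
instance (left : List Int) (right : List Int) (out : Int) : Decidable (Spec_solution left right out) := by unfold Spec_solution; infer_instance

-- ===== CLAIM (what is proved, stated in full; the proofs are below) =====
def Claim_equal_solution : Prop := ∀ (left : List Int) (right : List Int), Dom_solution left right → Spec_solution left right (solution left right)

-- ===== LEMMAS AND PROOFS =====

-- the pure recurrence both programs compute, on suffixes of left and right
def pvH : List Int → List Int → Int
  | [], _ => 0
  | _ :: _, [] => 0
  | la :: ls, r :: rs =>
      let v := max (pvH ls (r :: rs)) (pvH ls rs)
      if la > r then max v (pvH (la :: ls) rs + r) else v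
termination_by ls rs => ls.length + rs.length

@[simp] theorem pvH_nil_left (rs : List Int) : pvH [] rs = 0 := by
  rw [pvH]

@[simp] theorem pvH_nil_right (ls : List Int) : pvH ls [] = 0 := by
  cases ls <;> simp [pvH]

-- ---------- B side: the rolling row is the list of recurrence values on right-suffixes ----------

theorem pvNewRow_correct (la : Int) (ls : List Int) (rs : List Int) :
    pvNewRow la rs (rs.tails.map (pvH ls)) = rs.tails.map (pvH (la :: ls)) := by
  induction rs with
  | nil => simp [pvNewRow]
  | cons r rs ih =>
      cases rs with
      | nil => simp [pvNewRow, pvH]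
      | cons r' rs' =>
          simp only [List.tails, List.map_cons] at *
          rw [pvNewRow]
          simp only [List.tail_cons, List.headD_cons, ih]
          simp only [pvH]

theorem solution_alt_eq (left right : List Int) : solution_alt left right = pvH left right := by
  unfold solution_alt
  have base : List.replicate (right.length + 1) (0 : Int) = right.tails.map (pvH ([] : List Int)) := by
    rw [eq_comm, List.eq_replicate_iff]
    refine ⟨by simp, ?_⟩
    intro x hx
    simp only [List.mem_map] at hx
    obtain ⟨t, _, ht⟩ := hx
    simpa using ht.symm
  rw [base]
  have main : ∀ l : List Int,
      l.foldr (fun la row => pvNewRow la right row) (right.tails.map (pvH ([] : List Int)))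
        = right.tails.map (pvH l) := by
    intro l
    induction l with
    | nil => rfl
    | cons la l ih => simp only [List.foldr_cons, ih, pvNewRow_correct]
  rw [main]
  cases right <;> simp [List.tails]

-- ---------- A side: memo-table lemmas ----------

theorem pvGet2_set2_same (dp : List (List Int)) (a b : Nat) (v : Int)
    (ha : a < dp.length) (hb : b < (dp.getD a []).length) :
    pvGet2 (pvSet2 dp a b v) a b = v := by
  have hb' : b < dp[a].length := by
    rwa [List.getD_eq_getElem?_getD, List.getElem?_eq_getElem ha] at hb
  simp [pvGet2, pvSet2, List.getD_eq_getElem?_getD, ha, hb']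

theorem pvGet2_set2_ne (dp : List (List Int)) (a b a' b' : Nat) (v : Int)
    (h : a ≠ a' ∨ b ≠ b') :
    pvGet2 (pvSet2 dp a b v) a' b' = pvGet2 dp a' b' := by
  simp only [pvGet2, pvSet2, List.getD_eq_getElem?_getD, List.getElem?_set]
  rcases h with h | h
  · simp [h]
  · by_cases ha : a = a'
    · subst ha
      by_cases hlt : a < dp.length <;> simp [hlt, h]
    · simp [ha]

theorem pvSet2_length (dp : List (List Int)) (a b : Nat) (v : Int) :
    (pvSet2 dp a b v).length = dp.length := by simp [pvSet2]

theorem pvSet2_rows (dp : List (List Int)) (a b : Nat) (v : Int) (R : Nat)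
    (h : ∀ row ∈ dp, row.length = R) :
    ∀ row ∈ pvSet2 dp a b v, row.length = R := by
  intro row hrow
  rcases List.mem_or_eq_of_mem_set hrow with hm | he
  · exact h row hm
  · subst he
    by_cases hlt : a < dp.length
    · have hget : dp.getD a [] = dp[a] := by
        rw [List.getD_eq_getElem?_getD, List.getElem?_eq_getElem hlt]; rfl
      rw [List.length_set, hget]
      exact h _ (List.getElem_mem hlt)
    · have heq : dp.set a ((dp.getD a []).set b v) = dp := List.set_eq_of_length_le (by omega)
      unfold pvSet2 at hrow
      rw [heq] at hrow
      exact h _ hrow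

theorem pvRowLen (dp : List (List Int)) (a : Nat) (R : Nat)
    (h : ∀ row ∈ dp, row.length = R) (ha : a < dp.length) :
    (dp.getD a []).length = R := by
  have hget : dp.getD a [] = dp[a] := by
    rw [List.getD_eq_getElem?_getD, List.getElem?_eq_getElem ha]; rfl
  rw [hget]; exact h _ (List.getElem_mem ha)

-- main invariant lemma: pvRecursA returns the recurrence value, keeps the table's shape,
-- and every entry is either unchanged or a correctly memoized value in the region a ≤ x, b ≤ y
theorem pvRecursA_correct (left right : List Int) :
    ∀ n a b dp, (left.length - a) + (right.length - b) ≤ n →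
      dp.length = left.length →
      (∀ row ∈ dp, row.length = right.length) →
      (∀ x y : Nat, a ≤ x → b ≤ y → pvGet2 dp x y ≠ -1 →
          pvGet2 dp x y = pvH (left.drop x) (right.drop y)) →
      (pvRecursA left right a b dp).1 = pvH (left.drop a) (right.drop b) ∧
      (pvRecursA left right a b dp).2.length = left.length ∧
      (∀ row ∈ (pvRecursA left right a b dp).2, row.length = right.length) ∧
      (∀ x y : Nat, pvGet2 (pvRecursA left right a b dp).2 x y = pvGet2 dp x y ∨
          (a ≤ x ∧ b ≤ y ∧ pvGet2 (pvRecursA left right a b dp).2 x y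
            = pvH (left.drop x) (right.drop y))) := by
  intro n
  induction n with
  | zero =>
      intro a b dp hn hlen hrows _hpre
      have hbase : left.length ≤ a ∨ right.length ≤ b := by omega
      rw [pvRecursA, dif_pos hbase]
      refine ⟨?_, hlen, hrows, fun x y => Or.inl rfl⟩
      rcases hbase with h | h
      · rw [List.drop_of_length_le h]; simp
      · rw [List.drop_of_length_le h]; simp
  | succ n ih =>
      intro a b dp hn hlen hrows hpre
      by_cases hbase : left.length ≤ a ∨ right.length ≤ b
      · rw [pvRecursA, dif_pos hbase]
        refine ⟨?_, hlen, hrows, fun x y => Or.inl rfl⟩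
        rcases hbase with h | h
        · rw [List.drop_of_length_le h]; simp
        · rw [List.drop_of_length_le h]; simp
      · have ha : a < left.length := by omega
        have hb : b < right.length := by omega
        rw [pvRecursA, dif_neg hbase]
        by_cases hmemo : pvGet2 dp a b ≠ -1
        · rw [if_pos hmemo]
          exact ⟨hpre a b le_rfl le_rfl hmemo, hlen, hrows, fun x y => Or.inl rfl⟩
        · rw [if_neg hmemo]
          simp only []
          -- recursive call (a+1, b)
          obtain ⟨hv1, hl1, hr1, hc1⟩ := ih (a+1) b dp (by omega) hlen hrows
            (fun x y hx hy => hpre x y (by omega) hy)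
          set r1 := pvRecursA left right (a+1) b dp with hr1def
          -- recursive call (a+1, b+1)
          have hpre2 : ∀ x y : Nat, a+1 ≤ x → b+1 ≤ y → pvGet2 r1.2 x y ≠ -1 →
              pvGet2 r1.2 x y = pvH (left.drop x) (right.drop y) := by
            intro x y hx hy hne
            rcases hc1 x y with h | h
            · rw [h] at hne ⊢; exact hpre x y (by omega) (by omega) hne
            · exact h.2.2
          obtain ⟨hv2, hl2, hr2, hc2⟩ := ih (a+1) (b+1) r1.2 (by omega) hl1 hr1 hpre2
          set r2 := pvRecursA left right (a+1) (b+1) r1.2 with hr2def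
          set dp3 := pvSet2 r2.2 a b (max r1.1 r2.1) with hdp3
          have hl3 : dp3.length = left.length := by rw [hdp3, pvSet2_length]; exact hl2
          have hr3 : ∀ row ∈ dp3, row.length = right.length := pvSet2_rows _ _ _ _ _ hr2
          have hget3ab : pvGet2 dp3 a b = max r1.1 r2.1 :=
            pvGet2_set2_same _ _ _ _ (by omega) (by rw [pvRowLen r2.2 a _ hr2 (by omega)]; omega)
          have hget3ne : ∀ x y : Nat, a ≠ x ∨ b ≠ y → pvGet2 dp3 x y = pvGet2 r2.2 x y :=
            fun x y h => pvGet2_set2_ne _ _ _ _ _ _ h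
          -- facts about the current cell
          have hdropA : left.drop a = left[a] :: left.drop (a+1) := List.drop_eq_getElem_cons ha
          have hdropB : right.drop b = right[b] :: right.drop (b+1) := List.drop_eq_getElem_cons hb
          have hgetA : left.getD a 0 = left[a] := by
            rw [List.getD_eq_getElem?_getD, List.getElem?_eq_getElem ha]; rfl
          have hgetB : right.getD b 0 = right[b] := by
            rw [List.getD_eq_getElem?_getD, List.getElem?_eq_getElem hb]; rfl
          have hHab : pvH (left.drop a) (right.drop b)
              = (if left[a] > right[b]
                  then max (max (pvH (left.drop (a+1)) (right.drop b))
                               (pvH (left.drop (a+1)) (right.drop (b+1))))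
                       (pvH (left.drop a) (right.drop (b+1)) + right[b])
                  else max (pvH (left.drop (a+1)) (right.drop b))
                           (pvH (left.drop (a+1)) (right.drop (b+1)))) := by
            conv_lhs => rw [hdropA, hdropB, pvH]
            rw [← hdropA, ← hdropB]
          by_cases hgt : left.getD a 0 > right.getD b 0
          · rw [if_pos hgt]
            simp only []
            -- recursive call (a, b+1) on dp3
            have hpre3 : ∀ x y : Nat, a ≤ x → b+1 ≤ y → pvGet2 dp3 x y ≠ -1 →
                pvGet2 dp3 x y = pvH (left.drop x) (right.drop y) := by
              intro x y hx hy hne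
              rw [hget3ne x y (Or.inr (by omega))] at hne ⊢
              rcases hc2 x y with h | h
              · rw [h] at hne ⊢
                rcases hc1 x y with h' | h'
                · rw [h'] at hne ⊢; exact hpre x y hx (by omega) hne
                · exact h'.2.2
              · exact h.2.2
            obtain ⟨hv3, hl4, hr4, hc3⟩ := ih a (b+1) dp3 (by omega) hl3 hr3 hpre3
            set r3 := pvRecursA left right a (b+1) dp3 with hr3def
            set vfin := max (pvGet2 dp3 a b) (r3.1 + right.getD b 0) with hvfin
            set dp5 := pvSet2 r3.2 a b vfin with hdp5
            have hl5 : dp5.length = left.length := by rw [hdp5, pvSet2_length]; exact hl4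
            have hr5 : ∀ row ∈ dp5, row.length = right.length := pvSet2_rows _ _ _ _ _ hr4
            have hget5ab : pvGet2 dp5 a b = vfin :=
              pvGet2_set2_same _ _ _ _ (by omega) (by rw [pvRowLen r3.2 a _ hr4 (by omega)]; omega)
            have hcorrect : vfin = pvH (left.drop a) (right.drop b) := by
              rw [hvfin, hget3ab, hv1, hv2, hv3, hHab, hgetB]
              rw [hgetA, hgetB] at hgt
              rw [if_pos hgt]
            refine ⟨by rw [hget5ab, hcorrect], hl5, hr5, ?_⟩
            intro x y
            by_cases hxy : a = x ∧ b = y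
            · right
              obtain ⟨rfl, rfl⟩ := hxy
              exact ⟨le_rfl, le_rfl, by rw [hget5ab, hcorrect]⟩
            · have hne : a ≠ x ∨ b ≠ y := by tauto
              have h5 : pvGet2 dp5 x y = pvGet2 r3.2 x y := pvGet2_set2_ne _ _ _ _ _ _ hne
              rcases hc3 x y with h | h
              · rw [hget3ne x y hne] at h
                rcases hc2 x y with h' | h'
                · rcases hc1 x y with h'' | h''
                  · exact Or.inl (by rw [h5, h, h', h''])
                  · exact Or.inr ⟨by omega, by omega, by rw [h5, h, h']; exact h''.2.2⟩
                · exact Or.inr ⟨by omega, by omega, by rw [h5, h]; exact h'.2.2⟩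
              · exact Or.inr ⟨h.1, by omega, by rw [h5]; exact h.2.2⟩
          · rw [if_neg hgt]
            have hcorrect : pvGet2 dp3 a b = pvH (left.drop a) (right.drop b) := by
              rw [hget3ab, hv1, hv2, hHab]
              rw [hgetA, hgetB] at hgt
              rw [if_neg hgt]
            refine ⟨hcorrect, hl3, hr3, ?_⟩
            intro x y
            by_cases hxy : a = x ∧ b = y
            · right
              obtain ⟨rfl, rfl⟩ := hxy
              exact ⟨le_rfl, le_rfl, hcorrect⟩
            · have hne : a ≠ x ∨ b ≠ y := by tauto
              rcases hc2 x y with h' | h'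
              · rcases hc1 x y with h'' | h''
                · exact Or.inl (by rw [hget3ne x y hne, h', h''])
                · exact Or.inr ⟨by omega, by omega, by rw [hget3ne x y hne, h']; exact h''.2.2⟩
              · exact Or.inr ⟨by omega, by omega, by rw [hget3ne x y hne]; exact h'.2.2⟩

theorem solution_eq (left right : List Int) : solution left right = pvH left right := by
  unfold solution
  have hrep : (List.range left.length).map (fun _ => (List.range right.length).map (fun _ => (-1 : Int)))
      = List.replicate left.length (List.replicate right.length (-1)) := by
    simp [List.map_const']
  rw [hrep]
  have hinit : ∀ x y : Nat,
      pvGet2 (List.replicate left.length (List.replicate right.length (-1 : Int))) x y = -1 := by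
    intro x y
    unfold pvGet2
    simp only [List.getD_eq_getElem?_getD, List.getElem?_replicate]
    by_cases hx : x < left.length
    · simp only [if_pos hx, Option.getD_some]
      by_cases hy : y < right.length
      · simp [hy]
      · simp [hy]
    · simp [hx]
  have h := pvRecursA_correct left right (left.length + right.length) 0 0
    (List.replicate left.length (List.replicate right.length (-1 : Int)))
    (by omega) (by simp)
    (by intro row hrow; rw [List.eq_of_mem_replicate hrow]; simp)
    (fun x y _ _ hne => absurd (hinit x y) hne)
  simpa using h.1

-- ===== VERDICT (by name: the statement is the Claim_ definition above) =====
theorem solution_spec : Claim_equal_solution := by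
  intro left right _
  unfold Spec_solution
  rw [solution_alt_eq, solution_eq]
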